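-- pv_equiv track=rewrite | github.com/ekiuled/pairwise-similarities | vectorizer.py | composite_tag
-- ===== SOURCE A (Python) =====
-- def composite_tag(source, tag):
--     """Parses a composite tag into a list of items.
--
--     Parameters
--     ----------
--     source : str
--         String containing several tag instances.
--     tag : str
--         The tag to parse.
--
--     Returns
--     -------
--     list
--         List of tag contents.
--     """
--
--     vals = []
--     s = ''
--     for line in source.splitlines():
--         if line.startswith(tag):
--             if s:
--                 vals.append(s)
--             s = line.split(maxsplit=1)[1]
--         else:
--             s += ' ' + line.strip()
--     if s:
--         vals.append(s)
--     return vals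
-- ===== SOURCE B (Python) =====
-- def composite_tag(source, tag):
--     """Parses a composite tag into a list of items (group-then-map decomposition)."""
--     lines = source.splitlines()
--
--     def cont(ls):
--         return ''.join(' ' + l.strip() for l in ls)
--
--     def groups(ls):
--         # ls is empty or ls[0] starts with tag
--         if not ls:
--             return []
--         k = 1
--         while k < len(ls) and not ls[k].startswith(tag):
--             k += 1
--         return [(ls[0], ls[1:k])] + groups(ls[k:])
--
--     n = 0
--     while n < len(lines) and not lines[n].startswith(tag):
--         n += 1
--     vals = [cont(lines[:n])]
--     for head, body in groups(lines[n:]):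
--         vals.append(head.split(maxsplit=1)[1] + cont(body))
--     return [v for v in vals if v]
-- ===== Notes on version B (the rewrite author's own statement) =====
-- stated objective: alternative
-- what changed: Replaces A's single pass with a running accumulator and in-loop flushes by a two-phase decomposition: first split the lines into a leading group and tag-started groups, then map each group to its joined value and filter out empty ones.
import Mathlib
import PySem

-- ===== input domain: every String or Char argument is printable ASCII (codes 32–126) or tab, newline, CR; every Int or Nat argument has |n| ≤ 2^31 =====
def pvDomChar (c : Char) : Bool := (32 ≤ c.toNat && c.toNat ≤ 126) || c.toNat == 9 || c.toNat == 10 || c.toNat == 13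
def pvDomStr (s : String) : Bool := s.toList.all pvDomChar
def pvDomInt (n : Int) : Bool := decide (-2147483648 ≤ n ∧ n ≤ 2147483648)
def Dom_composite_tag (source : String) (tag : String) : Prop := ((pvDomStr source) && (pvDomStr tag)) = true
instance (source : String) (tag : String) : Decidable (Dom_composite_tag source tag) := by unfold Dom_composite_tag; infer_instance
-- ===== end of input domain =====

-- B re-parses the tag block by a group-then-map decomposition (split lines into a leading
-- group and tag-started groups, then map each group to its joined value) instead of A's
-- single running-accumulator pass; same asymptotic cost, alternative structure.


-- ===== PORT A =====
-- one iteration of A's loop over a line; state = (vals, s).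
-- `line.split(maxsplit=1)[1]` raises IndexError when the split has < 2 pieces: Pre_ excludes
-- exactly those inputs, so the `.getD []` default is never reached inside Pre_.
def compA_step (tag : List Char) (st : List (List Char) × List Char) (line : List Char) :
    List (List Char) × List Char :=
  if PySem.Chars.startswith line tag then
    ((if st.2.isEmpty then st.1 else st.1 ++ [st.2]),
     ((PySem.Chars.split₀Max line 1)[1]?).getD [])
  else
    (st.1, st.2 ++ (' ' :: PySem.Chars.strip line))

def composite_tag (source : String) (tag : String) : List String :=
  let r := (PySem.Chars.splitlines source.toList).foldl (compA_step tag.toList) ([], [])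
  let vals := if r.2.isEmpty then r.1 else r.1 ++ [r.2]
  vals.map String.ofList

-- ===== PORT B =====
-- ''.join(' ' + l.strip() for l in ls)
def compB_cont (ls : List (List Char)) : List Char :=
  (ls.map (fun l => ' ' :: PySem.Chars.strip l)).flatten

-- groups(ls): ls is empty or starts with a tag line; pair each tag line with its continuation lines
def compB_groups (tag : List Char) : List (List Char) → List (List Char × List (List Char))
  | [] => []
  | hd :: rest =>
      (hd, rest.takeWhile (fun l => !PySem.Chars.startswith l tag)) ::
        compB_groups tag (rest.dropWhile (fun l => !PySem.Chars.startswith l tag))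
termination_by ls => ls.length
decreasing_by
  have := List.length_dropWhile_le (fun l => !PySem.Chars.startswith l tag) rest
  simp; omega

def composite_tag_alt (source : String) (tag : String) : List String :=
  let lines := PySem.Chars.splitlines source.toList
  let lead := lines.takeWhile (fun l => !PySem.Chars.startswith l tag.toList)
  let rest := lines.dropWhile (fun l => !PySem.Chars.startswith l tag.toList)
  let vals := compB_cont lead ::
    (compB_groups tag.toList rest).map
      (fun g => (((PySem.Chars.split₀Max g.1 1)[1]?).getD []) ++ compB_cont g.2)
  (vals.filter (fun v => !v.isEmpty)).map String.ofList

-- ===== PRECONDITION & SPEC =====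
-- Pre_ excludes exactly the inputs where A raises IndexError: a line that starts with the tag
-- but has no content after its first whitespace-separated token.
def Pre_composite_tag (source : String) (tag : String) : Prop :=
  ∀ l ∈ PySem.Chars.splitlines source.toList,
    PySem.Chars.startswith l tag.toList = true → 2 ≤ (PySem.Chars.split₀Max l 1).length
instance (source : String) (tag : String) : Decidable (Pre_composite_tag source tag) := by
  unfold Pre_composite_tag; infer_instance

def pvWitness_composite_tag : String × String := ("T: alpha\n beta\nT: gamma", "T:")

def Spec_composite_tag (source : String) (tag : String) (out : List String) : Prop := out = composite_tag_alt source tag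
instance (source : String) (tag : String) (out : List String) : Decidable (Spec_composite_tag source tag out) := by unfold Spec_composite_tag; infer_instance

-- ===== CLAIM (what is proved, stated in full; the proofs are below) =====
def Claim_equal_composite_tag : Prop := ∀ (source : String) (tag : String), Dom_composite_tag source tag → Pre_composite_tag source tag → Spec_composite_tag source tag (composite_tag source tag)

-- ===== LEMMAS AND PROOFS =====

-- A's loop over lines none of which starts with the tag just accumulates onto s.
theorem foldA_nontag (tag : List Char) (vals : List (List Char)) (s : List Char)
    (ls : List (List Char)) (h : ∀ l ∈ ls, PySem.Chars.startswith l tag = false) :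
    ls.foldl (compA_step tag) (vals, s) = (vals, s ++ compB_cont ls) := by
  induction ls generalizing s with
  | nil => simp [compB_cont]
  | cons hd tl ih =>
      have hhd : PySem.Chars.startswith hd tag = false := h hd (by simp)
      simp only [List.foldl_cons, compA_step, hhd, Bool.false_eq_true, if_false]
      rw [ih _ (fun l hl => h l (by simp [hl]))]
      simp [compB_cont]

-- final flush of A's state
def flushA (st : List (List Char) × List Char) : List (List Char) :=
  if st.2.isEmpty then st.1 else st.1 ++ [st.2]

theorem flushA_eq_filter (vals : List (List Char)) (s : List Char) :
    flushA (vals, s) = vals ++ ([s].filter (fun v => !v.isEmpty)) := by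
  by_cases hs : s = [] <;> simp [flushA, hs]

-- main invariant: on a suffix that is empty or starts with a tag line, A's loop followed by
-- the flush produces vals ++ the nonempty group values (with s prepended as the pending value).
theorem foldA_groups (tag : List Char) (rest : List (List Char))
    (hhd : ∀ l, rest.head? = some l → PySem.Chars.startswith l tag = true) :
    ∀ (vals : List (List Char)) (s : List Char),
    flushA (rest.foldl (compA_step tag) (vals, s)) =
      vals ++ ((s :: (compB_groups tag rest).map
        (fun g => (((PySem.Chars.split₀Max g.1 1)[1]?).getD []) ++ compB_cont g.2)).filter
          (fun v => !v.isEmpty)) := by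
  induction rest using compB_groups.induct tag with
  | case1 =>
      intro vals s
      simp [compB_groups, flushA_eq_filter]
  | case2 hd tl ih =>
      intro vals s
      have hhd' : PySem.Chars.startswith hd tag = true := hhd hd rfl
      set p : List Char → Bool := fun l => !PySem.Chars.startswith l tag with hp
      have hsplit : tl.takeWhile p ++ tl.dropWhile p = tl := List.takeWhile_append_dropWhile
      have step1 : compA_step tag (vals, s) hd =
          (vals ++ ([s].filter (fun v => !v.isEmpty)),
           ((PySem.Chars.split₀Max hd 1)[1]?).getD []) := by
        rw [← flushA_eq_filter]
        by_cases hs : s = [] <;> simp [compA_step, hhd', flushA, hs]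
      have hnt : ∀ l ∈ tl.takeWhile p, PySem.Chars.startswith l tag = false := by
        intro l hl
        have := List.mem_takeWhile_imp hl
        simpa [p] using this
      have ih' := ih (fun l hl => by
        have := List.head?_dropWhile_not p tl
        rw [hl] at this
        simpa [p] using this)
      rw [List.foldl_cons, step1, ← hsplit, List.foldl_append,
        foldA_nontag tag _ _ _ hnt, ih']
      simp [compB_groups, hsplit, List.filter_cons, List.append_assoc]
      by_cases hs : s = [] <;> simp [hs, ← hp]

-- ===== VERDICT (by name: the statement is the Claim_ definition above) =====
theorem composite_tag_spec : Claim_equal_composite_tag := by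
  intro source tag _ hpre
  unfold Spec_composite_tag composite_tag composite_tag_alt
  set p : List Char → Bool := fun l => !PySem.Chars.startswith l tag.toList with hp
  set lines := PySem.Chars.splitlines source.toList with hl
  have hsplit : lines.takeWhile p ++ lines.dropWhile p = lines := List.takeWhile_append_dropWhile
  have h1 : (lines.takeWhile p).foldl (compA_step tag.toList) ([], []) =
      ([], compB_cont (lines.takeWhile p)) := by
    have := foldA_nontag tag.toList [] [] (lines.takeWhile p) (fun l hl => by
      have := List.mem_takeWhile_imp hl
      simpa [p] using this)
    simpa using this
  have h2 := foldA_groups tag.toList (lines.dropWhile p)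
    (fun l hl => by
      have := List.head?_dropWhile_not p lines
      rw [hl] at this
      simpa [p] using this)
    [] (compB_cont (lines.takeWhile p))
  calc (let r := lines.foldl (compA_step tag.toList) ([], []);
        (if r.2.isEmpty then r.1 else r.1 ++ [r.2]).map String.ofList)
      = (flushA (lines.foldl (compA_step tag.toList) ([], []))).map String.ofList := by
        simp [flushA]
    _ = _ := by
        rw [← hsplit, List.foldl_append, h1, h2]
        simp
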